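-- pv_equiv track=rewrite | github.com/CarmineOptions/derisk-research | apps/data_handler/handlers/order_books/ekubo/main.py | sort_ticks_by_asks_and_bids
-- ===== SOURCE A (Python) =====
-- def sort_ticks_by_asks_and_bids(sorted_liquidity_data: list,
--                                 current_tick: int) -> tuple[list, list]:
--     """
--     Sort tick by ask and bid
--     :param sorted_liquidity_data: list - List of sorted liquidity data
--     :param current_tick: int - Current tick
--     :return: list - List of sorted liquidity data
--     """
--     sorted_liquidity_data = sorted(sorted_liquidity_data, key=lambda x: x["tick"])
--     ask_data, bid_data = [], []
--     for sorted_data in sorted_liquidity_data: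
--         if sorted_data["tick"] > current_tick:
--             ask_data.append(sorted_data)
--         else:
--             bid_data.append(sorted_data)
--     return ask_data, bid_data
-- ===== SOURCE B (Python) =====
-- def sort_ticks_by_asks_and_bids(sorted_liquidity_data: list,
--                                 current_tick: int) -> tuple[list, list]:
--     """Two filtering comprehensions over the raw input, each side sorted locally
--     (no global sort, no accumulator loop)."""
--     asks = [d for d in sorted_liquidity_data if d["tick"] > current_tick]
--     bids = [d for d in sorted_liquidity_data if not d["tick"] > current_tick]
--     return (sorted(asks, key=lambda x: x["tick"]),
--             sorted(bids, key=lambda x: x["tick"]))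
-- ===== Notes on version B (the rewrite author's own statement) =====
-- stated objective: alternative
-- what changed: B replaces A's global stable sort followed by an appending partition loop with two independent filter comprehensions over the unsorted input, each side then sorted locally; equal because the sort is stable and the partition predicate depends only on the sort key, so filter-of-sorted equals sort-of-filter.
import Mathlib
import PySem

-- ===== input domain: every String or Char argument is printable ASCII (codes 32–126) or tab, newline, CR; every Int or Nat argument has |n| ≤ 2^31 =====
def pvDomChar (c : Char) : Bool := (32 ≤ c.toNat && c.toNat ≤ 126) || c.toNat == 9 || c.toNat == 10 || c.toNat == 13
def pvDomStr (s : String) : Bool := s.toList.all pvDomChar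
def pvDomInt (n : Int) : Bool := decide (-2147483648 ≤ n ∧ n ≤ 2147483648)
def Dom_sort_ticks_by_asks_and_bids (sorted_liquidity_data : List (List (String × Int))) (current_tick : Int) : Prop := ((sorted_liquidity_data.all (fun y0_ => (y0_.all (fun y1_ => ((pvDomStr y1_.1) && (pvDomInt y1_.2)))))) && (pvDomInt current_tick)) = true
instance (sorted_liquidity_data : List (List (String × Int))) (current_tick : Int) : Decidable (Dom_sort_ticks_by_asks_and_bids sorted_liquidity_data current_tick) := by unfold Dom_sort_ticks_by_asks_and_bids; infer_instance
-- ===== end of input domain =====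

-- B replaces A's global-sort-then-partition-loop by two filter comprehensions plus two local sorts (alternative decomposition, same cost).

-- x["tick"]: exact wherever the dict has a "tick" key (guaranteed by Pre_; default 0 is unreachable there)
def pvTick (d : List (String × Int)) : Int := PySem.Dict.getD (PySem.Dict.mk d) "tick" 0

-- ===== PORT A =====
def sort_ticks_by_asks_and_bids (sorted_liquidity_data : List (List (String × Int))) (current_tick : Int) : (List (List (String × Int))) × (List (List (String × Int))) :=
  let s := PySem.List.sorted sorted_liquidity_data (fun x => pvTick x)
  s.foldl (fun ab d => if pvTick d > current_tick then (ab.1 ++ [d], ab.2) else (ab.1, ab.2 ++ [d])) ([], [])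

-- ===== PORT B =====
def sort_ticks_by_asks_and_bids_alt (sorted_liquidity_data : List (List (String × Int))) (current_tick : Int) : (List (List (String × Int))) × (List (List (String × Int))) :=
  let asks := sorted_liquidity_data.filter (fun d => decide (pvTick d > current_tick))
  let bids := sorted_liquidity_data.filter (fun d => !decide (pvTick d > current_tick))
  (PySem.List.sorted asks (fun x => pvTick x), PySem.List.sorted bids (fun x => pvTick x))

-- ===== PRECONDITION & SPEC =====
-- Pre_ excludes exactly the inputs where Python A raises KeyError: some element dict lacks the "tick" key.
def Pre_sort_ticks_by_asks_and_bids (sorted_liquidity_data : List (List (String × Int))) (current_tick : Int) : Prop :=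
  (sorted_liquidity_data.all (fun d => d.any (fun kv => kv.1 == "tick"))) = true
instance (sorted_liquidity_data : List (List (String × Int))) (current_tick : Int) : Decidable (Pre_sort_ticks_by_asks_and_bids sorted_liquidity_data current_tick) := by unfold Pre_sort_ticks_by_asks_and_bids; infer_instance

def pvWitness_sort_ticks_by_asks_and_bids : (List (List (String × Int))) × Int :=
  ([[("tick", 5)], [("tick", 1), ("liq", 7)], [("tick", 3)]], 3)

def Spec_sort_ticks_by_asks_and_bids (sorted_liquidity_data : List (List (String × Int))) (current_tick : Int) (out : (List (List (String × Int))) × (List (List (String × Int)))) : Prop := out = sort_ticks_by_asks_and_bids_alt sorted_liquidity_data current_tick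
instance (sorted_liquidity_data : List (List (String × Int))) (current_tick : Int) (out : (List (List (String × Int))) × (List (List (String × Int)))) : Decidable (Spec_sort_ticks_by_asks_and_bids sorted_liquidity_data current_tick out) := by unfold Spec_sort_ticks_by_asks_and_bids; infer_instance

-- ===== CLAIM (what is proved, stated in full; the proofs are below) =====
def Claim_equal_sort_ticks_by_asks_and_bids : Prop := ∀ (sorted_liquidity_data : List (List (String × Int))) (current_tick : Int), Dom_sort_ticks_by_asks_and_bids sorted_liquidity_data current_tick → Pre_sort_ticks_by_asks_and_bids sorted_liquidity_data current_tick → Spec_sort_ticks_by_asks_and_bids sorted_liquidity_data current_tick (sort_ticks_by_asks_and_bids sorted_liquidity_data current_tick)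

-- ===== LEMMAS AND PROOFS =====

-- A's append-to-one-of-two-lists loop is a pair of filters of the traversed list.
theorem pvLoop_eq_filters (c : Int) (xs : List (List (String × Int))) (a b : List (List (String × Int))) :
    xs.foldl (fun ab d => if pvTick d > c then (ab.1 ++ [d], ab.2) else (ab.1, ab.2 ++ [d])) (a, b)
      = (a ++ xs.filter (fun d => decide (pvTick d > c)), b ++ xs.filter (fun d => !decide (pvTick d > c))) := by
  induction xs generalizing a b with
  | nil => simp
  | cons x xs ih =>
    by_cases h : pvTick x > c <;> simp [h, ih]

-- Filtering commutes with a stable insertion into a key-sorted list (any predicate).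
theorem pvFilter_insertBy (p : List (String × Int) → Bool) (x : List (String × Int))
    (ys : List (List (String × Int))) (hys : ys.Pairwise (fun a b => pvTick a ≤ pvTick b)) :
    (PySem.List.insertBy (fun a b => decide (pvTick a < pvTick b)) x ys).filter p
      = if p x then PySem.List.insertBy (fun a b => decide (pvTick a < pvTick b)) x (ys.filter p)
        else ys.filter p := by
  induction ys with
  | nil => by_cases hpx : p x <;> simp [PySem.List.insertBy, hpx]
  | cons y ys ih =>
    rcases List.pairwise_cons.mp hys with ⟨hy, hys'⟩
    by_cases hlt : pvTick x < pvTick y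
    · by_cases hpy : p y
      · by_cases hpx : p x <;> simp [PySem.List.insertBy, hlt, hpy, hpx]
      · simp only [PySem.List.insertBy, hlt, decide_true, if_true, List.filter_cons, hpy]
        by_cases hpx : p x
        · simp only [hpx, if_true]
          cases hfy : ys.filter p with
          | nil => simp [PySem.List.insertBy]
          | cons z zs =>
            have hz : z ∈ ys := List.mem_of_mem_filter (hfy ▸ List.mem_cons_self)
            have : pvTick x < pvTick z := lt_of_lt_of_le hlt (hy z hz)
            simp [PySem.List.insertBy, this]
        · simp [hpx]
    · simp only [PySem.List.insertBy, hlt, decide_false, Bool.false_eq_true, if_false,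
        List.filter_cons]
      by_cases hpy : p y
      · by_cases hpx : p x <;> simp [hpy, ih hys', PySem.List.insertBy, hlt, hpx]
      · simp [hpy, ih hys']

-- filter of stable sort = stable sort of filter (the heart of the equivalence).
theorem pvFilter_sorted (p : List (String × Int) → Bool) (xs : List (List (String × Int))) :
    (PySem.List.sorted xs (fun x => pvTick x)).filter p
      = PySem.List.sorted (xs.filter p) (fun x => pvTick x) := by
  induction xs using List.reverseRecOn with
  | nil => simp [PySem.List.sorted_eq_foldl_insertBy]
  | append_singleton xs x ih =>
    rw [PySem.List.sorted_eq_foldl_insertBy xs, PySem.List.sorted_eq_foldl_insertBy (xs ++ [x]),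
        List.foldl_append] at *
    simp only [List.foldl_cons, List.foldl_nil]
    rw [pvFilter_insertBy p x _ (by
      have := PySem.List.sorted_pairwise xs (fun x => pvTick x)
      rwa [PySem.List.sorted_eq_foldl_insertBy xs] at this)]
    rw [ih, List.filter_append, List.filter_cons]
    by_cases hpx : p x
    · simp [hpx, PySem.List.sorted_eq_foldl_insertBy, List.foldl_append]
    · simp [hpx, PySem.List.sorted_eq_foldl_insertBy]

-- ===== VERDICT (by name: the statement is the Claim_ definition above) =====
theorem sort_ticks_by_asks_and_bids_spec : Claim_equal_sort_ticks_by_asks_and_bids := by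
  intro xs c _ _
  unfold Spec_sort_ticks_by_asks_and_bids
  unfold sort_ticks_by_asks_and_bids sort_ticks_by_asks_and_bids_alt
  simp only [pvLoop_eq_filters, List.nil_append]
  rw [pvFilter_sorted, pvFilter_sorted]
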